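-- pv_equiv track=rewrite | github.com/abriggs914/Coding_Practice | Python/pixel_puzzle_solver/puzzle.py | rest_hint_vals
-- ===== SOURCE A (Python) =====
-- def rest_hint_vals(row, hint):
--     res = 0
--     seen = False
--     for i in range(len(row)):
--         if 0 < i < len(row) - 1:
--             res += 1
--         if row[i] != hint or seen:
--             res += row[i]
--         else:
--             seen = True
--     return res
-- ===== SOURCE B (Python) =====
-- def rest_hint_vals(row, hint):
--     return max(0, len(row) - 2) + sum(row) - (hint if hint in row else 0)
-- ===== Notes on version B (the rewrite author's own statement) =====
-- stated objective: simpler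
-- what changed: Replaces the index loop with its running res/seen state by a closed-form expression: position bonus max(0, len(row)-2) plus sum(row) minus one occurrence of hint when present; the C-level sum() gives a measured constant-factor speedup.
import Mathlib
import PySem

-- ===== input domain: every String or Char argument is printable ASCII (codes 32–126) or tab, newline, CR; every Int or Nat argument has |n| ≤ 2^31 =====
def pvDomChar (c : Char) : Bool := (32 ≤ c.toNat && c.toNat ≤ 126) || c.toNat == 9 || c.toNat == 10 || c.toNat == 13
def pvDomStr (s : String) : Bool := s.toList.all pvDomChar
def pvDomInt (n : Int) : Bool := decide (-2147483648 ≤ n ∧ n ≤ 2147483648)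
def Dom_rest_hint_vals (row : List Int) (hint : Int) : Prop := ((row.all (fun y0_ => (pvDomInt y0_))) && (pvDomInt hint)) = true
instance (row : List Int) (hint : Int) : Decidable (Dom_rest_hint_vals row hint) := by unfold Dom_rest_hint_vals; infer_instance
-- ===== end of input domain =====

-- B replaces A's index loop with its running res/seen state by the closed form
-- max(0, len(row)-2) + sum(row) - (hint if hint in row else 0)  (objective: simpler).

-- ===== PORT A =====
def rest_hint_vals (row : List Int) (hint : Int) : Int :=
  -- res = 0; seen = False; for i in range(len(row)): …
  ((PySem.List.pyRange 0 (row.length : Int) 1).foldl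
    (fun (st : Int × Bool) i =>
      let res := if 0 < i ∧ i < (row.length : Int) - 1 then st.1 + 1 else st.1
      let v := PySem.List.pyGetD row i 0   -- row[i]; i is always in range here
      if v ≠ hint ∨ st.2 = true then (res + v, st.2) else (res, true))
    (0, false)).1

-- ===== PORT B =====
def rest_hint_vals_alt (row : List Int) (hint : Int) : Int :=
  max 0 ((row.length : Int) - 2) + row.sum - (if hint ∈ row then hint else 0)

-- ===== PRECONDITION & SPEC =====
def Spec_rest_hint_vals (row : List Int) (hint : Int) (out : Int) : Prop := out = rest_hint_vals_alt row hint
instance (row : List Int) (hint : Int) (out : Int) : Decidable (Spec_rest_hint_vals row hint out) := by unfold Spec_rest_hint_vals; infer_instance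

-- ===== CLAIM (what is proved, stated in full; the proofs are below) =====
def Claim_equal_rest_hint_vals : Prop := ∀ (row : List Int) (hint : Int), Dom_rest_hint_vals row hint → Spec_rest_hint_vals row hint (rest_hint_vals row hint)

-- ===== LEMMAS AND PROOFS =====

-- Sum of A's position bonuses for `len` consecutive indices starting at s, with loop bound n.
def posSumFrom (s n : Int) : Nat → Int
  | 0 => 0
  | len + 1 => (if 0 < s ∧ s < n - 1 then (1 : Int) else 0) + posSumFrom (s + 1) n len

lemma posSumFrom_closed (n : Int) : ∀ (len : Nat) (s : Int),
    posSumFrom s n len = max 0 (min (s + len) (n - 1) - max s 1) := by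
  intro len
  induction len with
  | zero => intro s; simp only [posSumFrom]; omega
  | succ len ih =>
    intro s
    rw [posSumFrom, ih (s + 1)]
    push_cast
    split_ifs <;> omega

-- Loop invariant for A's fold, phrased over an enumerated suffix starting at index s.
lemma loopA_inv (hint n : Int) (xs : List Int) :
    ∀ (s res : Int) (seen : Bool),
    ((PySem.List.enumerate xs s).foldl
      (fun (st : Int × Bool) (p : Int × Int) =>
        let res := if 0 < p.1 ∧ p.1 < n - 1 then st.1 + 1 else st.1
        if p.2 ≠ hint ∨ st.2 = true then (res + p.2, st.2) else (res, true))
      (res, seen)).1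
    = res + posSumFrom s n xs.length + xs.sum
      - (if seen = false ∧ hint ∈ xs then hint else 0) := by
  induction xs with
  | nil => intro s res seen; simp [PySem.List.enumerate, posSumFrom]
  | cons x xs ih =>
    intro s res seen
    rw [PySem.List.enumerate_cons, List.foldl_cons]
    simp only [List.length_cons, posSumFrom, List.sum_cons, List.mem_cons]
    by_cases hs : seen = true
    · subst hs
      rw [if_pos (Or.inr rfl), ih (s + 1)]
      simp only [Bool.true_eq_false, false_and, if_false]
      split_ifs <;> ring
    · have hs' : seen = false := by cases seen <;> simp_all
      subst hs'
      by_cases hx : x = hint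
      · subst hx
        rw [if_neg (by simp), ih (s + 1)]
        simp only [Bool.true_eq_false, false_and, if_false, true_and, true_or, if_true]
        split_ifs <;> ring
      · rw [if_pos (Or.inl hx), ih (s + 1)]
        have hm : (hint = x ∨ hint ∈ xs) ↔ (hint ∈ xs) := by
          constructor
          · rintro (h | h)
            · exact absurd h.symm hx
            · exact h
          · exact Or.inr
        simp only [true_and, hm]
        split_ifs <;> ring

-- A's pyRange/pyGetD fold IS the fold over the enumerated list.
lemma rest_hint_vals_eq_enum (row : List Int) (hint : Int) :
    rest_hint_vals row hint
    = ((PySem.List.enumerate row 0).foldl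
        (fun (st : Int × Bool) (p : Int × Int) =>
          let res := if 0 < p.1 ∧ p.1 < (row.length : Int) - 1 then st.1 + 1 else st.1
          if p.2 ≠ hint ∨ st.2 = true then (res + p.2, st.2) else (res, true))
        (0, false)).1 := by
  rw [PySem.List.enumerate_eq_map_pyRange (d := 0), List.foldl_map]
  simp only [rest_hint_vals, PySem.List.len_eq]

theorem rest_hint_vals_spec : Claim_equal_rest_hint_vals := by
  intro row hint _
  unfold Spec_rest_hint_vals rest_hint_vals_alt
  rw [rest_hint_vals_eq_enum, loopA_inv hint ((row.length : Int)) row 0 0 false]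
  rw [posSumFrom_closed]
  have hmax : max 0 (min ((0 : Int) + row.length) ((row.length : Int) - 1) - max 0 1)
      = max 0 ((row.length : Int) - 2) := by omega
  rw [hmax]
  simp only [true_and]
  split_ifs <;> ring
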